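-- pv_equiv track=rewrite | github.com/AnniePawl/Anna-Interview-Prep | PYnative/StringExercises/lower_first.py | lower_first
-- ===== SOURCE A (Python) =====
-- def lower_first(str):
--   lower_string = []
--   upper_string = []
--
--   for char in str:
--     if char.islower():
--       lower_string.append(char)
--     else:
--       upper_string.append(char)
--
--   return "".join(lower_string+upper_string)
-- ===== SOURCE B (Python) =====
-- def lower_first(str):
--   return "".join(sorted(str, key=lambda c: not c.islower()))
-- ===== Notes on version B (the rewrite author's own statement) =====
-- stated objective: idiomatic
-- what changed: Replaced the explicit two-bucket accumulation loop by a single stable sort keyed on whether the character fails to be lowercase: lowercase chars sort first and stability preserves relative order, reproducing the partition.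
import Mathlib
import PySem

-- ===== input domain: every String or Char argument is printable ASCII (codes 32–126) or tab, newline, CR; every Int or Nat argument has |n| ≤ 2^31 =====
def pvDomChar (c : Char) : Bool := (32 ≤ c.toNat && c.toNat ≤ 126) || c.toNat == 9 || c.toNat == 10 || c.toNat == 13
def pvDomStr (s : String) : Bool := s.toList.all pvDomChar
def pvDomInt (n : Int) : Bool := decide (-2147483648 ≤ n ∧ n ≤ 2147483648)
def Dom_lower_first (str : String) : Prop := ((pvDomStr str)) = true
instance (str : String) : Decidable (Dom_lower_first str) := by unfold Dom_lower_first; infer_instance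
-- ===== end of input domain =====

-- B replaces A's explicit two-bucket loop by one stable sort keyed on 'not c.islower()' (idiomatic; same result).

-- ===== PORT A =====
-- the for-loop over the string's chars, accumulating the two bucket lists
def lowerFirstLoop (cs : List Char) (lower upper : List Char) : List Char × List Char :=
  match cs with
  | [] => (lower, upper)
  | c :: rest =>
      if PySem.Chars.islower c then lowerFirstLoop rest (lower ++ [c]) upper
      else lowerFirstLoop rest lower (upper ++ [c])

def lower_first (str : String) : String :=
  let p := lowerFirstLoop str.toList [] []
  String.mk (p.1 ++ p.2)

-- ===== PORT B =====
-- sorted(str, key=lambda c: not c.islower()); the boolean key is encoded as Nat (False→0, True→1)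
def lower_first_alt (str : String) : String :=
  String.mk (PySem.List.sorted str.toList (fun c => if PySem.Chars.islower c then (0 : Nat) else 1))

-- ===== PRECONDITION & SPEC =====
def Spec_lower_first (str : String) (out : String) : Prop := out = lower_first_alt str
instance (str : String) (out : String) : Decidable (Spec_lower_first str out) := by unfold Spec_lower_first; infer_instance

-- ===== CLAIM (what is proved, stated in full; the proofs are below) =====
def Claim_equal_lower_first : Prop := ∀ (str : String), Dom_lower_first str → Spec_lower_first str (lower_first str)

-- ===== LEMMAS AND PROOFS =====

def lfKey (c : Char) : Nat := if PySem.Chars.islower c then 0 else 1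

def lfIns (acc : List Char) (x : Char) : List Char :=
  PySem.List.insertBy (fun a b => decide (lfKey a < lfKey b)) x acc

lemma lfKey_le (c : Char) : lfKey c ≤ 1 := by
  unfold lfKey; split <;> omega

lemma lfIns_low (x : Char) (hx : lfKey x = 0) (l u : List Char)
    (hl : ∀ c ∈ l, lfKey c = 0) (hu : ∀ c ∈ u, lfKey c = 1) :
    lfIns (l ++ u) x = (l ++ [x]) ++ u := by
  induction l with
  | nil =>
      cases u with
      | nil => rfl
      | cons y ys =>
          have hy : lfKey y = 1 := hu y (by simp)
          simp [lfIns, PySem.List.insertBy, hx, hy]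
  | cons a l' ih =>
      have ha : lfKey a = 0 := hl a (by simp)
      have := ih (fun c hc => hl c (by simp [hc]))
      simp only [List.cons_append]
      simp [lfIns, PySem.List.insertBy, hx, ha] at this ⊢
      exact this

lemma lfIns_high (x : Char) (hx : lfKey x = 1) (ys : List Char) :
    lfIns ys x = ys ++ [x] := by
  apply PySem.List.insertBy_of_forall_not_before
  intro y _
  have := lfKey_le y
  simp [hx]
  omega

lemma foldl_lfIns (xs l u : List Char)
    (hl : ∀ c ∈ l, lfKey c = 0) (hu : ∀ c ∈ u, lfKey c = 1) :
    xs.foldl lfIns (l ++ u)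
      = (l ++ xs.filter (fun c => PySem.Chars.islower c))
        ++ (u ++ xs.filter (fun c => !PySem.Chars.islower c)) := by
  induction xs generalizing l u with
  | nil => simp
  | cons x rest ih =>
      by_cases hx : PySem.Chars.islower x
      · have hk : lfKey x = 0 := by simp [lfKey, hx]
        have step := lfIns_low x hk l u hl hu
        have hrec := ih (l ++ [x]) u
          (by intro c hc; rcases List.mem_append.1 hc with h | h
              · exact hl c h
              · simp at h; subst h; exact hk) hu
        simp only [List.foldl_cons, step, hrec]
        simp [hx]
      · have hk : lfKey x = 1 := by simp [lfKey, hx]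
        have step := lfIns_high x hk (l ++ u)
        have hrec := ih l (u ++ [x]) hl
          (by intro c hc; rcases List.mem_append.1 hc with h | h
              · exact hu c h
              · simp at h; subst h; exact hk)
        simp only [List.foldl_cons, step, List.append_assoc, hrec]
        simp [hx]

lemma sorted_lfKey (xs : List Char) :
    PySem.List.sorted xs (fun c => if PySem.Chars.islower c then (0 : Nat) else 1)
      = xs.filter (fun c => PySem.Chars.islower c)
        ++ xs.filter (fun c => !PySem.Chars.islower c) := by
  have h := PySem.List.sorted_eq_foldl_insertBy xs (fun c => if PySem.Chars.islower c then (0 : Nat) else 1)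
  have h2 := foldl_lfIns xs [] [] (by simp) (by simp)
  simpa [lfIns, lfKey] using h.trans h2

lemma lowerFirstLoop_spec (xs l u : List Char) :
    lowerFirstLoop xs l u
      = (l ++ xs.filter (fun c => PySem.Chars.islower c),
         u ++ xs.filter (fun c => !PySem.Chars.islower c)) := by
  induction xs generalizing l u with
  | nil => simp [lowerFirstLoop]
  | cons x rest ih =>
      by_cases hx : PySem.Chars.islower x <;>
        simp [lowerFirstLoop, hx, ih]

-- ===== VERDICT (by name: the statement is the Claim_ definition above) =====
theorem lower_first_spec : Claim_equal_lower_first := by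
  intro str _
  unfold Spec_lower_first lower_first lower_first_alt
  simp [lowerFirstLoop_spec, sorted_lfKey]
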